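-- pv_equiv track=rewrite | github.com/techzapploy/time-tracker | parse_features.py | categorize_feature
-- ===== SOURCE A (Python) =====
-- def categorize_feature(section_name: str, subsection_name: str, description: str) -> str:
--     """Determine the category based on section, subsection, and description."""
--     section_lower = section_name.lower()
--     subsection_lower = subsection_name.lower()
--     desc_lower = description.lower()
--
--     # Integration indicators (be more specific)
--     if 'integration' in section_lower and 'api' in section_lower:
--         return 'integration'
--     if any(keyword in subsection_lower for keyword in ['api', 'webhook', 'zapier', 'integration']):
--         # But exclude workspace/SSO which are security features
--         if not any(keyword in subsection_lower for keyword in ['workspace', 'sso', 'owner', 'admin']):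
--             return 'integration'
--     if any(keyword in desc_lower for keyword in ['api', 'webhook', 'third-party', 'programmatic access']):
--         return 'integration'
--
--     # Security indicators (check before workspace management)
--     if any(keyword in section_lower for keyword in ['role', 'permission', 'security', 'authentication']):
--         return 'security'
--     if any(keyword in subsection_lower for keyword in ['role', 'permission', 'auth', 'pin', 'access control', 'security', 'owner', 'admin', 'manager', 'user group', 'invite', 'deactivate']):
--         return 'security'
--     if any(keyword in desc_lower for keyword in ['authentication', 'authorization', 'permission', 'access', 'role', 'security', 'pin', 'password']):
--         return 'security'
--
--     # Performance indicators
--     if any(keyword in subsection_lower for keyword in ['offline', 'sync', 'cache', 'performance']):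
--         return 'performance'
--     if any(keyword in desc_lower for keyword in ['offline', 'sync', 'cache', 'performance', 'optimization']):
--         return 'performance'
--
--     # UI indicators
--     if any(keyword in subsection_lower for keyword in ['view', 'dashboard', 'interface', 'layout', 'calendar', 'timesheet', 'customization', 'design']):
--         return 'ui'
--     if any(keyword in desc_lower for keyword in ['visual', 'display', 'view', 'interface', 'layout', 'dashboard', 'widget']):
--         return 'ui'
--
--     # Default to functional
--     return 'functional'
-- ===== SOURCE B (Python) =====
-- # Back-to-front accumulator scan: traverse the rules in REVERSE priority order,
-- # overwriting the result on every match (no early return); the last overwrite,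
-- # i.e. the highest-priority matching rule, wins.  Field 0/1/2 = section/subsection/description.
-- RULES = [
--     (0, "all", ["integration", "api"], [], "integration"),
--     (1, "any", ["api", "webhook", "zapier", "integration"],
--                ["workspace", "sso", "owner", "admin"], "integration"),
--     (2, "any", ["api", "webhook", "third-party", "programmatic access"], [], "integration"),
--     (0, "any", ["role", "permission", "security", "authentication"], [], "security"),
--     (1, "any", ["role", "permission", "auth", "pin", "access control", "security",
--                 "owner", "admin", "manager", "user group", "invite", "deactivate"], [], "security"),
--     (2, "any", ["authentication", "authorization", "permission", "access", "role",
--                 "security", "pin", "password"], [], "security"),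
--     (1, "any", ["offline", "sync", "cache", "performance"], [], "performance"),
--     (2, "any", ["offline", "sync", "cache", "performance", "optimization"], [], "performance"),
--     (1, "any", ["view", "dashboard", "interface", "layout", "calendar", "timesheet",
--                 "customization", "design"], [], "ui"),
--     (2, "any", ["visual", "display", "view", "interface", "layout", "dashboard", "widget"], [], "ui"),
-- ]
--
--
-- def categorize_feature(section_name: str, subsection_name: str, description: str) -> str:
--     """Determine the category based on section, subsection, and description."""
--     texts = (section_name.lower(), subsection_name.lower(), description.lower())
--     result = "functional"
--     for field, mode, keywords, exclusions, category in reversed(RULES):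
--         text = texts[field]
--         hit = all(k in text for k in keywords) if mode == "all" else any(k in text for k in keywords)
--         if hit and not any(k in text for k in exclusions):
--             result = category
--     return result
-- ===== Notes on version B (the rewrite author's own statement) =====
-- stated objective: alternative
-- what changed: Replaces A's forward early-return if-chain by a back-to-front accumulator scan over an ordered rule table: B iterates the rules in reverse priority order with no early return, overwriting the result on every match, so the last overwrite (the highest-priority matching rule) wins.
import Mathlib
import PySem

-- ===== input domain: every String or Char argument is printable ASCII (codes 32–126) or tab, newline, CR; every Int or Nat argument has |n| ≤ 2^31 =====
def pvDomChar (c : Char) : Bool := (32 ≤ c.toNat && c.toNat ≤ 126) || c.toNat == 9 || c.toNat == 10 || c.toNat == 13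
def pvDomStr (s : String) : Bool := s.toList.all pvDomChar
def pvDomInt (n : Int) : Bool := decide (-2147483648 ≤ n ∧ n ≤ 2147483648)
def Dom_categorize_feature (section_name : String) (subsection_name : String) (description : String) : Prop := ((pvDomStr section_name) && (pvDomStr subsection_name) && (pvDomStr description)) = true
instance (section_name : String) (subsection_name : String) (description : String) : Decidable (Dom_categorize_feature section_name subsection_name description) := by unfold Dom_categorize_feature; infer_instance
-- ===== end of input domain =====

-- B replaces A's early-return if-chain by a reverse-order overwrite scan over a rule table
-- (back-to-front accumulator; the last overwrite = highest-priority match wins); same cost.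

-- ===== PORT A =====
-- literal transliteration of A's if-chain; nested 'if A: if not B: return' becomes 'if A && !B'
def categorize_feature (section_name : String) (subsection_name : String) (description : String) : String :=
  let section_lower := PySem.Str.lower section_name
  let subsection_lower := PySem.Str.lower subsection_name
  let desc_lower := PySem.Str.lower description
  if PySem.Str.isIn "integration" section_lower && PySem.Str.isIn "api" section_lower then "integration"
  else if (["api", "webhook", "zapier", "integration"].any (fun k => PySem.Str.isIn k subsection_lower)) &&
          !(["workspace", "sso", "owner", "admin"].any (fun k => PySem.Str.isIn k subsection_lower)) then "integration"
  else if ["api", "webhook", "third-party", "programmatic access"].any (fun k => PySem.Str.isIn k desc_lower) then "integration"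
  else if ["role", "permission", "security", "authentication"].any (fun k => PySem.Str.isIn k section_lower) then "security"
  else if ["role", "permission", "auth", "pin", "access control", "security", "owner", "admin", "manager", "user group", "invite", "deactivate"].any (fun k => PySem.Str.isIn k subsection_lower) then "security"
  else if ["authentication", "authorization", "permission", "access", "role", "security", "pin", "password"].any (fun k => PySem.Str.isIn k desc_lower) then "security"
  else if ["offline", "sync", "cache", "performance"].any (fun k => PySem.Str.isIn k subsection_lower) then "performance"
  else if ["offline", "sync", "cache", "performance", "optimization"].any (fun k => PySem.Str.isIn k desc_lower) then "performance"
  else if ["view", "dashboard", "interface", "layout", "calendar", "timesheet", "customization", "design"].any (fun k => PySem.Str.isIn k subsection_lower) then "ui"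
  else if ["visual", "display", "view", "interface", "layout", "dashboard", "widget"].any (fun k => PySem.Str.isIn k desc_lower) then "ui"
  else "functional"

-- ===== PORT B =====
-- the rule table of Source B: (field index 0/1/2, mode, keywords, exclusions, category)
def pvRules : List (Nat × String × List String × List String × String) :=
  [ (0, "all", ["integration", "api"], [], "integration"),
    (1, "any", ["api", "webhook", "zapier", "integration"],
               ["workspace", "sso", "owner", "admin"], "integration"),
    (2, "any", ["api", "webhook", "third-party", "programmatic access"], [], "integration"),
    (0, "any", ["role", "permission", "security", "authentication"], [], "security"),
    (1, "any", ["role", "permission", "auth", "pin", "access control", "security",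
                "owner", "admin", "manager", "user group", "invite", "deactivate"], [], "security"),
    (2, "any", ["authentication", "authorization", "permission", "access", "role",
                "security", "pin", "password"], [], "security"),
    (1, "any", ["offline", "sync", "cache", "performance"], [], "performance"),
    (2, "any", ["offline", "sync", "cache", "performance", "optimization"], [], "performance"),
    (1, "any", ["view", "dashboard", "interface", "layout", "calendar", "timesheet",
                "customization", "design"], [], "ui"),
    (2, "any", ["visual", "display", "view", "interface", "layout", "dashboard", "widget"], [], "ui") ]

-- texts[field] of Source B (field is always 0, 1 or 2 in the table)
def pvField (texts : String × String × String) (i : Nat) : String :=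
  if i == 0 then texts.1 else if i == 1 then texts.2.1 else texts.2.2

-- Source B's reversed-loop body: overwrite the accumulator whenever the rule matches
def pvStep (texts : String × String × String) (acc : String)
    (rule : Nat × String × List String × List String × String) : String :=
  let (field, mode, keywords, exclusions, category) := rule
  let text := pvField texts field
  let hit := if mode == "all" then keywords.all (fun k => PySem.Str.isIn k text)
             else keywords.any (fun k => PySem.Str.isIn k text)
  if hit && !(exclusions.any (fun k => PySem.Str.isIn k text)) then category else acc

def categorize_feature_alt (section_name : String) (subsection_name : String) (description : String) : String :=
  let texts := (PySem.Str.lower section_name, PySem.Str.lower subsection_name, PySem.Str.lower description)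
  pvRules.reverse.foldl (pvStep texts) "functional"

-- ===== PRECONDITION & SPEC =====
def Spec_categorize_feature (section_name : String) (subsection_name : String) (description : String) (out : String) : Prop := out = categorize_feature_alt section_name subsection_name description
instance (section_name : String) (subsection_name : String) (description : String) (out : String) : Decidable (Spec_categorize_feature section_name subsection_name description out) := by unfold Spec_categorize_feature; infer_instance

-- ===== CLAIM (what is proved, stated in full; the proofs are below) =====
def Claim_equal_categorize_feature : Prop := ∀ (section_name : String) (subsection_name : String) (description : String), Dom_categorize_feature section_name subsection_name description → Spec_categorize_feature section_name subsection_name description (categorize_feature section_name subsection_name description)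

-- ===== LEMMAS AND PROOFS =====

-- proof helper: first-match recursion over a rule list (head = highest priority)
def pvFirst (texts : String × String × String)
    (rules : List (Nat × String × List String × List String × String)) (d : String) : String :=
  match rules with
  | [] => d
  | r :: rest => pvStep texts (pvFirst texts rest d) r

-- back-to-front overwrite fold equals head-first first-match recursion
theorem pvFoldRev_eq_first (texts : String × String × String)
    (rules : List (Nat × String × List String × List String × String)) (d : String) :
    rules.reverse.foldl (pvStep texts) d = pvFirst texts rules d := by
  induction rules with
  | nil => rfl
  | cons r rest ih =>
    simp only [List.reverse_cons, List.foldl_append, List.foldl_cons, List.foldl_nil, pvFirst, ih]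

-- ===== VERDICT (by name: the statement is the Claim_ definition above) =====
theorem categorize_feature_spec : Claim_equal_categorize_feature := by
  intro s sub d _
  simp only [Spec_categorize_feature, categorize_feature_alt, pvFoldRev_eq_first]
  simp only [categorize_feature, pvRules, pvFirst, pvStep, pvField,
    List.all_cons, List.all_nil, List.any_cons, List.any_nil,
    String.reduceEq, beq_iff_eq, Nat.reduceBEq, beq_self_eq_true, if_true, if_false,
    Bool.or_false, Bool.and_true, Bool.not_false]
  rfl
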